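-- pv_equiv track=rewrite | github.com/jasondbelt/overview | identify_adjacent.py | identify_adjacent
-- ===== SOURCE A (Python) =====
-- def identify_adjacent(s: str, k: int) -> str:
--     # want to store pair of characters and their consecutive counts
--     # [[char: count]
--     stack = []
--
--     # iterate through each character in string
--     for char in s:
--         # if string isn't empty and last element, first index is char...
--         # increment char count by 1
--         if stack and stack[-1][0] == char:
--             stack[-1][1] += 1
--         # append character and a count of 1
--         else:
--             stack.append([char, 1])
--         # if stack's last element, first index value is equal to k...
--         # remove it from the stack
--         if stack[-1][1] == k:
--             stack.pop()
--
--     # return string from stack by repeating each char according to its count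
--     return ''.join(char * count for char, count in stack)
-- ===== SOURCE B (Python) =====
-- def identify_adjacent(s: str, k: int) -> str:
--     # Fixed-point pass collapse: repeatedly replace each maximal run of
--     # length L by L % k copies of its character until the string is stable.
--     if k <= 0:
--         return s
--     while True:
--         out = []
--         i = 0
--         n = len(s)
--         while i < n:
--             j = i
--             while j < n and s[j] == s[i]:
--                 j += 1
--             out.append(s[i] * ((j - i) % k))
--             i = j
--         t = ''.join(out)
--         if t == s:
--             return s
--         s = t
-- ===== Notes on version B (the rewrite author's own statement) =====
-- stated objective: alternative
-- what changed: Replaces A's single-pass stack of (char, count) pairs with a guard for k <= 0 plus a repeated whole-string pass that rewrites every maximal run of length L to L % k characters and iterates to a fixed point.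
import Mathlib
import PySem

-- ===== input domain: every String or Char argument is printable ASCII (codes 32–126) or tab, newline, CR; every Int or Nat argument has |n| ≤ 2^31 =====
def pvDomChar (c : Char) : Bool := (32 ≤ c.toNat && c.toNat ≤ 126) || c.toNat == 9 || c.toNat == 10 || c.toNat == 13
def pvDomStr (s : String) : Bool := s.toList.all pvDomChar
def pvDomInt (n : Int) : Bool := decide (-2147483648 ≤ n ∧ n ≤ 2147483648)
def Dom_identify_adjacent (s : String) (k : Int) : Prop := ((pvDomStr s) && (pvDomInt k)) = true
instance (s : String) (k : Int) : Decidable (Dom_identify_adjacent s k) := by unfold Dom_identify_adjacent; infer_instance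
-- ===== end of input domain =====

-- B replaces A's single-pass run-counting stack by a repeated whole-string pass that
-- collapses every maximal run of length L to L % k characters until a fixed point
-- (alternative algorithm, same result; not claimed faster).

-- ===== PORT A =====
-- One loop iteration of A: merge `c` into the run on top of the stack (or push a new
-- run), then pop the top run if its count reached k.  Stack top = list head.
def stepA (k : Int) (st : List (Char × Nat)) (c : Char) : List (Char × Nat) :=
  match st with
  | (d, n) :: t =>
      if d = c then
        (if ((n + 1 : Nat) : Int) = k then t else (d, n + 1) :: t)
      else
        (if ((1 : Nat) : Int) = k then (d, n) :: t else (c, 1) :: (d, n) :: t)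
  | [] => if ((1 : Nat) : Int) = k then [] else [(c, 1)]

def identify_adjacent (s : String) (k : Int) : String :=
  String.ofList (((s.toList.foldl (stepA k) []).reverse).flatMap
    (fun p => List.replicate p.2 p.1))

-- ===== PORT B =====
-- One pass of Source B's inner while-loop: scan the maximal run starting at the head,
-- emit (run length) % K copies of its character, continue after the run.
def passB (K : Nat) (l : List Char) : List Char :=
  match l with
  | [] => []
  | c :: rest =>
      List.replicate (((rest.takeWhile (· == c)).length + 1) % K) c
        ++ passB K (rest.dropWhile (· == c))
termination_by l.length
decreasing_by
  simp only [List.length_cons]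
  exact Nat.lt_succ_of_le (List.length_dropWhile_le _ _)

-- Termination facts for Source B's outer while-True loop (cited by fixB's decreasing_by).
theorem passB_length_le (K : Nat) (l : List Char) : (passB K l).length ≤ l.length := by
  fun_induction passB K l with
  | case1 => simp
  | case2 c rest ih =>
      have hsplit : (rest.takeWhile (· == c)).length + (rest.dropWhile (· == c)).length
          = rest.length := by
        have h := congrArg List.length
          (List.takeWhile_append_dropWhile (p := (· == c)) (l := rest))
        rw [List.length_append] at h
        exact h
      have hmod := Nat.mod_le ((rest.takeWhile (· == c)).length + 1) K
      simp only [List.length_append, List.length_replicate, List.length_cons]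
      omega

theorem passB_shrink (K : Nat) (l : List Char) :
    passB K l = l ∨ (passB K l).length < l.length := by
  fun_induction passB K l with
  | case1 => left; rfl
  | case2 c rest ih =>
      have hsplit : (rest.takeWhile (· == c)).length + (rest.dropWhile (· == c)).length
          = rest.length := by
        have h := congrArg List.length
          (List.takeWhile_append_dropWhile (p := (· == c)) (l := rest))
        rw [List.length_append] at h
        exact h
      have hmod := Nat.mod_le ((rest.takeWhile (· == c)).length + 1) K
      by_cases hm : ((rest.takeWhile (· == c)).length + 1) % K
          = (rest.takeWhile (· == c)).length + 1
      · rcases ih with heq | hlt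
        · left
          rw [hm, heq, List.replicate_succ]
          have htw : rest.takeWhile (· == c)
              = List.replicate (rest.takeWhile (· == c)).length c := by
            rw [List.eq_replicate_iff]
            exact ⟨rfl, fun x hx => by simpa using List.mem_takeWhile_imp hx⟩
          rw [← htw, List.cons_append, List.takeWhile_append_dropWhile]
        · right
          have := passB_length_le K (rest.dropWhile (· == c))
          simp only [List.length_append, List.length_replicate, List.length_cons]
          omega
      · right
        have := passB_length_le K (rest.dropWhile (· == c))
        simp only [List.length_append, List.length_replicate, List.length_cons]
        omega

-- Source B's outer loop: repeat the pass until the string stops changing.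
def fixB (K : Nat) (l : List Char) : List Char :=
  let l' := passB K l
  if h : l' = l then l else fixB K l'
termination_by l.length
decreasing_by
  rcases passB_shrink K l with heq | hlt
  · exact absurd heq h
  · exact hlt

def identify_adjacent_alt (s : String) (k : Int) : String :=
  if k ≤ 0 then s else String.ofList (fixB k.toNat s.toList)

-- ===== PRECONDITION & SPEC =====
def Spec_identify_adjacent (s : String) (k : Int) (out : String) : Prop := out = identify_adjacent_alt s k
instance (s : String) (k : Int) (out : String) : Decidable (Spec_identify_adjacent s k out) := by unfold Spec_identify_adjacent; infer_instance

-- ===== CLAIM (what is proved, stated in full; the proofs are below) =====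
def Claim_equal_identify_adjacent : Prop := ∀ (s : String) (k : Int), Dom_identify_adjacent s k → Spec_identify_adjacent s k (identify_adjacent s k)

-- ===== LEMMAS AND PROOFS =====

-- Maximal runs of a list: (character, run length) in order.
def runs (l : List Char) : List (Char × Nat) :=
  match l with
  | [] => []
  | c :: rest =>
      (c, (rest.takeWhile (· == c)).length + 1) :: runs (rest.dropWhile (· == c))
termination_by l.length
decreasing_by
  simp only [List.length_cons]
  exact Nat.lt_succ_of_le (List.length_dropWhile_le _ _)

def flatRuns (rs : List (Char × Nat)) : List Char :=
  rs.flatMap fun p => List.replicate p.2 p.1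

def flatMod (K : Nat) (rs : List (Char × Nat)) : List Char :=
  rs.flatMap fun p => List.replicate (p.2 % K) p.1

theorem runs_flatten (l : List Char) : flatRuns (runs l) = l := by
  fun_induction runs l with
  | case1 => rfl
  | case2 c rest ih =>
      have htw : rest.takeWhile (· == c)
          = List.replicate (rest.takeWhile (· == c)).length c := by
        rw [List.eq_replicate_iff]
        exact ⟨rfl, fun x hx => by simpa using List.mem_takeWhile_imp hx⟩
      simp only [flatRuns, List.flatMap_cons] at *
      rw [ih, List.replicate_succ, List.cons_append]
      rw [← htw, List.takeWhile_append_dropWhile]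

theorem passB_eq_flatMod (K : Nat) (l : List Char) : passB K l = flatMod K (runs l) := by
  fun_induction passB K l with
  | case1 => simp [runs, flatMod]
  | case2 c rest ih => rw [runs]; simp only [flatMod, List.flatMap_cons]; rw [ih]; rfl

theorem runs_pos (l : List Char) : ∀ p ∈ runs l, 1 ≤ p.2 := by
  fun_induction runs l with
  | case1 => simp
  | case2 c rest ih =>
      intro p hp
      rcases List.mem_cons.mp hp with rfl | hp
      · omega
      · exact ih p hp

theorem head_runs (l : List Char) (p : Char × Nat) (h : p ∈ (runs l).head?) :
    l.head? = some p.1 := by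
  cases l with
  | nil => simp [runs] at h
  | cons c rest => rw [runs] at h; simp at h; simp [← h]

theorem runs_chain (l : List Char) :
    List.IsChain (fun a b : Char × Nat => a.1 ≠ b.1) (runs l) := by
  fun_induction runs l with
  | case1 => simp
  | case2 c rest ih =>
      rw [List.isChain_cons]
      refine ⟨?_, ih⟩
      intro b hb
      have hd := head_runs _ _ hb
      cases hdw : rest.dropWhile (· == c) with
      | nil => rw [hdw] at hd; simp at hd
      | cons d s' =>
          rw [hdw] at hd
          simp at hd
          have hne : (d == c) = false := by
            have hne' := List.head_dropWhile_not (· == c) (l := rest) (by simp [hdw])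
            simpa [hdw] using hne'
          simp only [ne_eq]
          rw [← hd]
          intro hcd
          simp [hcd] at hne

-- Invariant of A's stack for k ≥ 1: adjacent entries carry distinct characters and
-- every count n satisfies 1 ≤ n < k.
def InvA (k : Int) (st : List (Char × Nat)) : Prop :=
  List.IsChain (fun a b : Char × Nat => a.1 ≠ b.1) st ∧ ∀ p ∈ st, 1 ≤ p.2 ∧ (p.2 : Int) < k

theorem stepA_inv (k : Int) (hk : 1 ≤ k) (st : List (Char × Nat)) (c : Char)
    (h : InvA k st) : InvA k (stepA k st c) := by
  obtain ⟨hch, hb⟩ := h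
  cases st with
  | nil =>
      simp only [stepA]
      by_cases h1 : ((1 : Nat) : Int) = k
      · rw [if_pos h1]
        exact ⟨List.isChain_nil, by simp⟩
      · rw [if_neg h1]
        refine ⟨by simp, ?_⟩
        intro p hp
        simp at hp
        subst hp
        refine ⟨le_refl 1, ?_⟩
        simp only
        omega
  | cons q t =>
      obtain ⟨d, n⟩ := q
      have hbn := hb (d, n) (by simp)
      rw [List.isChain_cons] at hch
      by_cases hdc : d = c
      · by_cases h1 : ((n + 1 : Nat) : Int) = k
        · have hs : stepA k ((d, n) :: t) c = t := by
            simp only [stepA, if_pos hdc, if_pos h1]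
          rw [hs]
          exact ⟨hch.2, fun p hp => hb p (List.mem_cons_of_mem _ hp)⟩
        · have hs : stepA k ((d, n) :: t) c = (d, n + 1) :: t := by
            simp only [stepA, if_pos hdc, if_neg h1]
          rw [hs]
          constructor
          · rw [List.isChain_cons]
            exact ⟨hch.1, hch.2⟩
          · intro p hp
            rcases List.mem_cons.mp hp with rfl | hp
            · refine ⟨by omega, ?_⟩
              simp only
              have := hbn.2
              omega
            · exact hb p (List.mem_cons_of_mem _ hp)
      · by_cases h1 : ((1 : Nat) : Int) = k
        · have hs : stepA k ((d, n) :: t) c = (d, n) :: t := by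
            simp only [stepA, if_neg hdc, if_pos h1]
          rw [hs]
          exact ⟨by rw [List.isChain_cons]; exact hch, hb⟩
        · have hs : stepA k ((d, n) :: t) c = (c, 1) :: (d, n) :: t := by
            simp only [stepA, if_neg hdc, if_neg h1]
          rw [hs]
          constructor
          · rw [List.isChain_cons]
            refine ⟨?_, by rw [List.isChain_cons]; exact hch⟩
            intro b hb'
            simp at hb'
            subst hb'
            simp only
            exact fun h' => hdc h'.symm
          · intro p hp
            rcases List.mem_cons.mp hp with rfl | hp
            · refine ⟨le_refl 1, ?_⟩
              simp only
              omega
            · exact hb p hp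

theorem foldl_inv (k : Int) (hk : 1 ≤ k) (l : List Char) :
    ∀ st, InvA k st → InvA k (l.foldl (stepA k) st) := by
  induction l with
  | nil => intro st h; exact h
  | cons c l ih => intro st h; exact ih _ (stepA_inv k hk st c h)

theorem incrA (k : Int) (c : Char) :
    ∀ (j m : Nat) (t : List (Char × Nat)),
      (∀ i : Nat, i < j → ((m + i + 1 : Nat) : Int) ≠ k) →
      List.foldl (stepA k) ((c, m) :: t) (List.replicate j c) = (c, m + j) :: t := by
  intro j
  induction j with
  | zero => intro m t _; simp
  | succ j ih =>
      intro m t h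
      rw [List.replicate_succ, List.foldl_cons]
      have h0 := h 0 (by omega)
      have hstep : stepA k ((c, m) :: t) c = (c, m + 1) :: t := by
        simp only [stepA]
        split_ifs with h1 h2 <;> first | rfl | (exfalso; omega)
      rw [hstep, ih (m + 1) t (fun i hi => by have := h (i + 1) (by omega); omega)]
      rw [show m + 1 + j = m + (j + 1) from by omega]

theorem run_push (k : Int) (c : Char) (st : List (Char × Nat)) (n : Nat)
    (htop : ∀ q ∈ st.head?, q.1 ≠ c) (hn : 1 ≤ n)
    (hcnt : ∀ i : Nat, i < n → ((i + 1 : Nat) : Int) ≠ k) :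
    List.foldl (stepA k) st (List.replicate n c) = (c, n) :: st := by
  obtain ⟨n', rfl⟩ : ∃ n', n = n' + 1 := ⟨n - 1, by omega⟩
  rw [List.replicate_succ, List.foldl_cons]
  have h1 : ((0 + 1 : Nat) : Int) ≠ k := hcnt 0 (by omega)
  have hstep : stepA k st c = (c, 1) :: st := by
    cases st with
    | nil => simp only [stepA]; split_ifs with h2 <;> first | rfl | (exfalso; omega)
    | cons q t =>
        obtain ⟨d, m⟩ := q
        have hd : d ≠ c := htop (d, m) (by simp)
        simp only [stepA]
        split_ifs with h2 h3 <;>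
          first | rfl | (exfalso; omega) | exact absurd h2 hd
  rw [hstep, incrA k c n' 1 st (fun i hi => by have := hcnt (i + 1) (by omega); omega)]
  rw [show 1 + n' = n' + 1 from by omega]

theorem exactK (k : Int) (hk : 1 ≤ k) (c : Char) (m : Nat) (t : List (Char × Nat))
    (hm1 : 1 ≤ m) (hmk : (m : Int) < k) :
    List.foldl (stepA k) ((c, m) :: t) (List.replicate (k.toNat - m) c) = t := by
  have hmK : m < k.toNat := by omega
  rw [show k.toNat - m = (k.toNat - m - 1) + 1 from by omega, List.replicate_add,
    List.foldl_append]
  rw [incrA k c (k.toNat - m - 1) m t (fun i hi => by omega)]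
  simp only [List.replicate_one, List.foldl_cons, List.foldl_nil]
  simp only [stepA]
  split_ifs with h1 h2 <;> first | rfl | (exfalso; omega)

theorem repK_id (k : Int) (hk : 1 ≤ k) (c : Char) (st : List (Char × Nat))
    (h : InvA k st) :
    List.foldl (stepA k) st (List.replicate k.toNat c) = st := by
  obtain ⟨hch, hb⟩ := h
  cases st with
  | nil =>
      by_cases hk1 : k = 1
      · subst hk1
        simp [stepA]
      · rw [show k.toNat = 1 + (k.toNat - 1) from by omega, List.replicate_add,
          List.foldl_append]
        have hstep : List.foldl (stepA k) [] (List.replicate 1 c) = [(c, 1)] := by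
          simp only [List.replicate_one, List.foldl_cons, List.foldl_nil, stepA]
          split_ifs with h1 <;> first | rfl | (exfalso; omega)
        rw [hstep, exactK k hk c 1 [] (by omega) (by omega)]
  | cons q t =>
      obtain ⟨d, n⟩ := q
      have hbn := hb (d, n) (by simp)
      by_cases hdc : d = c
      · subst hdc
        rw [show k.toNat = (k.toNat - n) + n from by omega, List.replicate_add,
          List.foldl_append]
        rw [exactK k hk d n t hbn.1 hbn.2]
        have htop : ∀ q ∈ t.head?, q.1 ≠ d := by
          rw [List.isChain_cons] at hch
          intro q hq hqd
          exact hch.1 q hq hqd.symm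
        exact run_push k d t n htop hbn.1 (fun i hi => by have := hbn.2; omega)
      · by_cases hk1 : k = 1
        · subst hk1
          simp [stepA, hdc]
        · rw [show k.toNat = 1 + (k.toNat - 1) from by omega, List.replicate_add,
            List.foldl_append]
          have hstep : List.foldl (stepA k) ((d, n) :: t) (List.replicate 1 c)
              = (c, 1) :: (d, n) :: t := by
            simp only [List.replicate_one, List.foldl_cons, List.foldl_nil, stepA]
            split_ifs with h1 h2 <;>
              first | rfl | (exfalso; omega) | exact absurd h1 hdc
          rw [hstep, exactK k hk c 1 ((d, n) :: t) (by omega) (by omega)]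

theorem rep_mod (k : Int) (hk : 1 ≤ k) (c : Char) (st : List (Char × Nat))
    (h : InvA k st) (L : Nat) :
    List.foldl (stepA k) st (List.replicate L c)
      = List.foldl (stepA k) st (List.replicate (L % k.toNat) c) := by
  by_cases hL : L < k.toNat
  · rw [Nat.mod_eq_of_lt hL]
  · rw [show L = k.toNat + (L - k.toNat) from by omega, List.replicate_add,
      List.foldl_append, repK_id k hk c st h, Nat.add_mod_left]
    exact rep_mod k hk c st h (L - k.toNat)
termination_by L
decreasing_by omega

theorem foldl_flatMod (k : Int) (hk : 1 ≤ k) :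
    ∀ (rs : List (Char × Nat)) (st), InvA k st →
      List.foldl (stepA k) st (flatMod k.toNat rs)
        = List.foldl (stepA k) st (flatRuns rs) := by
  intro rs
  induction rs with
  | nil => intro st _; rfl
  | cons p rs ih =>
      intro st h
      obtain ⟨c, n⟩ := p
      simp only [flatMod, flatRuns, List.flatMap_cons, List.foldl_append]
      rw [← rep_mod k hk c st h n]
      exact ih _ (foldl_inv k hk _ st h)

theorem process_runs (k : Int) :
    ∀ (rs st : List (Char × Nat)),
      List.IsChain (fun a b : Char × Nat => a.1 ≠ b.1) rs →
      (∀ p ∈ rs, 1 ≤ p.2 ∧ ∀ i : Nat, i < p.2 → ((i + 1 : Nat) : Int) ≠ k) →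
      (∀ q ∈ st.head?, ∀ p ∈ rs.head?, q.1 ≠ p.1) →
      List.foldl (stepA k) st (flatRuns rs) = rs.reverse ++ st := by
  intro rs
  induction rs with
  | nil => intro st _ _ _; rfl
  | cons p rs ih =>
      intro st hch hcnt hhd
      obtain ⟨c, n⟩ := p
      simp only [flatRuns, List.flatMap_cons, List.foldl_append]
      have hp := hcnt (c, n) (by simp)
      rw [run_push k c st n (fun q hq => hhd q hq (c, n) (by simp)) hp.1 hp.2]
      rw [List.isChain_cons] at hch
      have := ih ((c, n) :: st) hch.2 (fun p hp => hcnt p (List.mem_cons_of_mem _ hp))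
        (by intro q hq p hp; simp at hq; subst hq; exact hch.1 p hp)
      simp only [flatRuns] at this
      rw [this]
      simp

theorem noPop_result (k : Int) (l : List Char)
    (hcnt : ∀ p ∈ runs l, ∀ i : Nat, i < p.2 → ((i + 1 : Nat) : Int) ≠ k) :
    l.foldl (stepA k) [] = (runs l).reverse := by
  have h := process_runs k (runs l) [] (runs_chain l)
    (fun p hp => ⟨runs_pos l p hp, hcnt p hp⟩) (by simp)
  conv_lhs => rw [← runs_flatten l]
  rw [h, List.append_nil]

theorem A_output (k : Int) (l : List Char)
    (hcnt : ∀ p ∈ runs l, ∀ i : Nat, i < p.2 → ((i + 1 : Nat) : Int) ≠ k) :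
    ((l.foldl (stepA k) []).reverse).flatMap (fun p => List.replicate p.2 p.1) = l := by
  rw [noPop_result k l hcnt, List.reverse_reverse]
  exact runs_flatten l

theorem flatMod_len_le (K : Nat) (rs : List (Char × Nat)) :
    (flatMod K rs).length ≤ (flatRuns rs).length := by
  induction rs with
  | nil => simp [flatMod, flatRuns]
  | cons p rs ih =>
      simp only [flatMod, flatRuns, List.flatMap_cons, List.length_append,
        List.length_replicate] at *
      have := Nat.mod_le p.2 K
      omega

theorem flatMod_eq_imp (K : Nat) :
    ∀ rs : List (Char × Nat), flatMod K rs = flatRuns rs → ∀ p ∈ rs, p.2 % K = p.2 := by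
  intro rs
  induction rs with
  | nil => intro _ p hp; simp at hp
  | cons q rs ih =>
      intro h p hp
      obtain ⟨c, n⟩ := q
      simp only [flatMod, flatRuns, List.flatMap_cons] at h
      have hlen := congrArg List.length h
      simp only [List.length_append, List.length_replicate] at hlen
      have hle := flatMod_len_le K rs
      simp only [flatMod, flatRuns] at hle
      have hmn : n % K = n := by have := Nat.mod_le n K; omega
      rw [hmn] at h
      have hrest := List.append_cancel_left h
      rcases List.mem_cons.mp hp with rfl | hp
      · exact hmn
      · exact ih hrest p hp

theorem A_fixed (k : Int) (hk : 1 ≤ k) (l : List Char)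
    (hfix : passB k.toNat l = l) :
    ((l.foldl (stepA k) []).reverse).flatMap (fun p => List.replicate p.2 p.1) = l := by
  have heq : flatMod k.toNat (runs l) = flatRuns (runs l) := by
    rw [← passB_eq_flatMod, hfix, runs_flatten]
  have hpt := flatMod_eq_imp k.toNat (runs l) heq
  apply A_output
  intro p hp i hi
  have hK : 1 ≤ k.toNat := by omega
  have hmod := hpt p hp
  have hlt : p.2 < k.toNat := by
    by_contra hge
    have := Nat.mod_lt p.2 (show 0 < k.toNat by omega)
    omega
  omega

theorem A_pass (k : Int) (hk : 1 ≤ k) (l : List Char) :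
    l.foldl (stepA k) [] = (passB k.toNat l).foldl (stepA k) [] := by
  have hinv : InvA k ([] : List (Char × Nat)) := ⟨by simp, by simp⟩
  rw [passB_eq_flatMod]
  conv_lhs => rw [← runs_flatten l]
  exact (foldl_flatMod k hk (runs l) [] hinv).symm

theorem main_eq (k : Int) (hk : 1 ≤ k) (l : List Char) :
    ((l.foldl (stepA k) []).reverse).flatMap (fun p => List.replicate p.2 p.1)
      = fixB k.toNat l := by
  by_cases h : passB k.toNat l = l
  · rw [fixB]
    simp only [h, dif_pos]
    exact A_fixed k hk l h
  · have h2 := A_pass k hk l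
    rw [h2, main_eq k hk (passB k.toNat l)]
    conv_rhs => rw [fixB]
    simp only [h, dif_neg, not_false_iff]
termination_by l.length
decreasing_by
  rcases passB_shrink k.toNat l with heq | hlt
  · exact absurd heq h
  · exact hlt

-- ===== VERDICT (by name: the statement is the Claim_ definition above) =====
theorem identify_adjacent_spec : Claim_equal_identify_adjacent := by
  unfold Claim_equal_identify_adjacent Spec_identify_adjacent
  intro s k _
  unfold identify_adjacent identify_adjacent_alt
  by_cases hk : k ≤ 0
  · rw [if_pos hk]
    rw [A_output k s.toList (by intro p hp i hi; omega), String.ofList_toList]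
  · rw [if_neg hk]
    exact congrArg String.ofList (main_eq k (by omega) s.toList)
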